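-- pv_equiv track=rewrite | github.com/NielsVeenstraTue/5SIB0_group2_2024 | Scheduler/EDFscheduler.py | convertDep2Succ
-- ===== SOURCE A (Python) =====
-- def convertDep2Succ(dependencies):
--     # Convert dependencies xml to working dictionary format
--     predecessors = []
--     successors = []
--     dictionary = {}
--     for id, task in enumerate(dependencies):
--         predecessors.append(task['pred'])
--         successors.append(task['succ'])
--
--     for pred, succ in zip(predecessors, successors):
--         if pred in dictionary:
--             dictionary[pred].append(succ)
--         else:
--             dictionary[pred] = [succ]
--
--     for key in dictionary:
--         dictionary[key].sort()
--
--     return dictionary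
-- ===== SOURCE B (Python) =====
-- def convertDep2Succ(dependencies):
--     # One global stable sort by successor replaces the per-group sorts:
--     # keys are laid out in first-occurrence order, then each successor is
--     # appended in globally sorted order, so every group comes out sorted.
--     dictionary = {task['pred']: [] for task in dependencies}
--     for pred, succ in sorted(((t['pred'], t['succ']) for t in dependencies),
--                              key=lambda p: p[1]):
--         dictionary[pred].append(succ)
--     return dictionary
-- ===== Notes on version B (the rewrite author's own statement) =====
-- stated objective: alternative
-- what changed: Instead of grouping first and then sorting every group separately, B pre-seeds the dictionary keys in first-occurrence order and fills it in a single pass over the (pred, succ) pairs sorted once globally by succ, so each group is born sorted.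
import Mathlib
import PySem

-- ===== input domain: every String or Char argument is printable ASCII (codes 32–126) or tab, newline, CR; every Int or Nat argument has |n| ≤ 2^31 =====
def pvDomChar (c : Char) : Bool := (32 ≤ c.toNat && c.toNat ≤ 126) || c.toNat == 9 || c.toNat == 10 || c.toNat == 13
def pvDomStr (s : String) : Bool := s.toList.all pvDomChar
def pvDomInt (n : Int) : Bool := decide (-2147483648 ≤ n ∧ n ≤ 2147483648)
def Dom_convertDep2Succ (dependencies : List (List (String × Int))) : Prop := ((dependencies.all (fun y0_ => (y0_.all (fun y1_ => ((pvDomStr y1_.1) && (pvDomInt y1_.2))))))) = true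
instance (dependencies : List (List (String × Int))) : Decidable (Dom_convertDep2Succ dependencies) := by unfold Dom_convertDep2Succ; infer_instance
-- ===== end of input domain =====

-- B replaces A's group-then-sort-each-group by one global stable sort of the (pred, succ)
-- pairs by succ, filled into a key-preseeded dict in a single pass (alternative decomposition).


-- ===== PORT A =====
-- task['pred'] : first-match lookup in the task's dict; a missing key is a Python
-- KeyError, excluded by Pre_, so the .getD 0 default is never the value used there.
def pvLookup (task : List (String × Int)) (key : String) : Int :=
  ((PySem.Dict.mk task).get? key).getD 0

-- Literal port of A: one pass collecting predecessors/successors (the unused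
-- enumerate index is dropped), a grouping loop with A's two branches, then
-- 'for key in dictionary: dictionary[key].sort()' as an in-place map over the items.
def convertDep2Succ (dependencies : List (List (String × Int))) : List (Int × List Int) :=
  let lists : List Int × List Int :=
    dependencies.foldl
      (fun acc task => (acc.1 ++ [pvLookup task "pred"], acc.2 ++ [pvLookup task "succ"]))
      ([], [])
  let dictionary : PySem.Dict Int (List Int) :=
    (lists.1.zip lists.2).foldl
      (fun d ps =>
        if d.contains ps.1 then d.modify ps.1 [] (fun v => v ++ [ps.2])
        else d.insert ps.1 [ps.2])
      PySem.Dict.empty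
  dictionary.items.map (fun kv => (kv.1, PySem.List.sorted kv.2 (fun x => x) false))

-- ===== PORT B =====
-- Literal port of Source B: preseed keys (dict comprehension), one global sort by succ,
-- then d[pred].append(succ) — the key is always present, so modify's [] default is exact.
def convertDep2Succ_alt (dependencies : List (List (String × Int))) : List (Int × List Int) :=
  let dictionary : PySem.Dict Int (List Int) :=
    dependencies.foldl (fun d task => d.insert (pvLookup task "pred") ([] : List Int))
      PySem.Dict.empty
  let pairs : List (Int × Int) :=
    PySem.List.sorted (dependencies.map (fun t => (pvLookup t "pred", pvLookup t "succ")))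
      (fun p => p.2) false
  (pairs.foldl (fun d p => d.modify p.1 [] (fun v => v ++ [p.2])) dictionary).items

-- ===== PRECONDITION & SPEC =====
-- Pre_ excludes exactly the tasks on which A raises KeyError: a task dict missing 'pred' or 'succ'.
def Pre_convertDep2Succ (dependencies : List (List (String × Int))) : Prop :=
  ∀ task ∈ dependencies,
    (PySem.Dict.mk task).contains "pred" = true ∧ (PySem.Dict.mk task).contains "succ" = true
instance (dependencies : List (List (String × Int))) : Decidable (Pre_convertDep2Succ dependencies) := by
  unfold Pre_convertDep2Succ; infer_instance

def pvWitness_convertDep2Succ : (List (List (String × Int))) :=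
  [[("pred", 1), ("succ", 3)], [("pred", 1), ("succ", 2)], [("pred", 2), ("succ", 5)]]

def Spec_convertDep2Succ (dependencies : List (List (String × Int))) (out : List (Int × List Int)) : Prop := out = convertDep2Succ_alt dependencies
instance (dependencies : List (List (String × Int))) (out : List (Int × List Int)) : Decidable (Spec_convertDep2Succ dependencies out) := by unfold Spec_convertDep2Succ; infer_instance

-- ===== CLAIM (what is proved, stated in full; the proofs are below) =====
def Claim_equal_convertDep2Succ : Prop := ∀ (dependencies : List (List (String × Int))), Dom_convertDep2Succ dependencies → Pre_convertDep2Succ dependencies → Spec_convertDep2Succ dependencies (convertDep2Succ dependencies)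

-- ===== LEMMAS AND PROOFS =====

-- A's collecting loop builds exactly the map.
theorem pv_foldl_append_map {α β : Type} (l : List α) (f : α → β) (acc : List β) :
    l.foldl (fun a t => a ++ [f t]) acc = acc ++ l.map f := by
  induction l generalizing acc with
  | nil => simp
  | cons x xs ih => simp [List.foldl_cons, ih]

-- A's two grouping branches are one 'modify'.
theorem pv_step_eq_modify (d : PySem.Dict Int (List Int)) (p : Int × Int) :
    (if d.contains p.1 then d.modify p.1 [] (fun v => v ++ [p.2])
     else d.insert p.1 [p.2]) = d.modify p.1 [] (fun v => v ++ [p.2]) := by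
  by_cases h : d.contains p.1
  · simp [h]
  · rw [if_neg h, PySem.Dict.modify, PySem.Dict.getD_of_not_contains d [] (by simpa using h), List.nil_append]

-- B's key-preseeding loop keeps every value [].
theorem pv_getD_preseed (deps : List (List (String × Int))) (d : PySem.Dict Int (List Int))
    (h : ∀ k, d.getD k ([] : List Int) = []) (k : Int) :
    (deps.foldl (fun d task => d.insert (pvLookup task "pred") ([] : List Int)) d).getD k [] = [] := by
  induction deps generalizing d with
  | nil => simpa using h k
  | cons t ts ih =>
      simp only [List.foldl_cons]
      exact ih _ (fun k' => by rw [PySem.Dict.getD_insert]; split <;> simp [h])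

-- Per-group: sorting the group's succs = filtering the globally succ-sorted pairs.
theorem pv_group_sorted (ps : List (Int × Int)) (k : Int) :
    PySem.List.sorted ((ps.filter (fun p => p.1 == k)).map (fun x => x.2)) (fun x => x) false
      = ((PySem.List.sorted ps (fun p => p.2) false).filter (fun p => p.1 == k)).map (fun x => x.2) := by
  apply PySem.List.sorted_id_eq_of_perm_of_pairwise
  · exact ((PySem.List.sorted_perm ps (fun p => p.2) false).filter _).map _
  · exact List.pairwise_map.mpr ((PySem.List.sorted_pairwise ps (fun p => p.2)).filter _)

-- ===== VERDICT (by name: the statement is the Claim_ definition above) =====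
theorem convertDep2Succ_spec : Claim_equal_convertDep2Succ := by
  intro deps _ _
  unfold Spec_convertDep2Succ convertDep2Succ convertDep2Succ_alt
  simp only []
  set ps : List (Int × Int) := deps.map (fun t => (pvLookup t "pred", pvLookup t "succ")) with hps
  -- Step 1: A's collected lists zip to ps
  have hzip : ((deps.foldl
      (fun acc task => (acc.1 ++ [pvLookup task "pred"], acc.2 ++ [pvLookup task "succ"]))
      (([], []) : List Int × List Int)).1.zip
      (deps.foldl
      (fun acc task => (acc.1 ++ [pvLookup task "pred"], acc.2 ++ [pvLookup task "succ"]))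
      (([], []) : List Int × List Int)).2) = ps := by
    rw [PySem.List.foldl_prod_mk (f := fun a t => a ++ [pvLookup t "pred"])
      (g := fun a t => a ++ [pvLookup t "succ"])]
    rw [pv_foldl_append_map, pv_foldl_append_map]
    simp [hps, List.zip_map']
  rw [hzip]
  -- Step 2: collapse A's branches into modify
  have hfold : ps.foldl
      (fun d p => if d.contains p.1 then d.modify p.1 [] (fun v => v ++ [p.2])
        else d.insert p.1 [p.2]) PySem.Dict.empty
      = ps.foldl (fun d p => d.modify p.1 [] (fun v => v ++ [p.2])) PySem.Dict.empty := by
    exact PySem.List.foldl_congr_mem ps _ _ _ (fun acc p _ => pv_step_eq_modify acc p)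
  rw [hfold]
  set dA := ps.foldl (fun d p => d.modify p.1 [] (fun v => v ++ [p.2])) PySem.Dict.empty with hdA
  set d0 := deps.foldl (fun d task => d.insert (pvLookup task "pred") ([] : List Int)) PySem.Dict.empty with hd0
  set sps := PySem.List.sorted ps (fun p => p.2) false with hsps
  set dB := sps.foldl (fun d p => d.modify p.1 [] (fun v => v ++ [p.2])) d0 with hdB
  -- keys
  have hKA : dA.keys = PySem.Set.ofList (ps.map (fun p => p.1)) := by
    rw [hdA, PySem.Dict.keys_foldl_modify_key ps (fun p => p.1) [] (fun _ p => (fun v => v ++ [p.2]))]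
    simp [PySem.Dict.keys_empty, PySem.Set.update_nil_left]
  have hK0 : d0.keys = PySem.Set.ofList (ps.map (fun p => p.1)) := by
    rw [hd0, PySem.Dict.keys_foldl_insert_key deps (fun t => pvLookup t "pred") (fun _ _ => ([] : List Int))]
    simp [PySem.Dict.keys_empty, PySem.Set.update_nil_left, hps, List.map_map, Function.comp_def]
  have hKB : dB.keys = dA.keys := by
    rw [hdB, PySem.Dict.keys_foldl_modify_key sps (fun p => p.1) [] (fun _ p => (fun v => v ++ [p.2])), hK0,
      PySem.Set.update_eq_append_filter, hKA]
    have : ((PySem.Set.ofList (sps.map (fun p => p.1))).filter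
        (fun y => !(PySem.Set.contains (PySem.Set.ofList (ps.map (fun p => p.1))) y))) = [] := by
      rw [List.filter_eq_nil_iff]
      intro y hy
      have hy' : y ∈ sps.map (fun p => p.1) := (PySem.Set.mem_ofList _ _).mp hy
      obtain ⟨p, hp, rfl⟩ := List.mem_map.mp hy'
      have hpps : p ∈ ps := (PySem.List.mem_sorted _ _ _ _).mp hp
      simp
      exact ⟨p.2, hpps⟩
    rw [this, List.append_nil]
  have hndA : dA.keys.Nodup := by
    rw [hdA]
    exact PySem.Dict.nodup_keys_foldl_modify_key ps (fun p => p.1) [] (fun _ p => (fun v => v ++ [p.2]))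
      PySem.Dict.empty PySem.Dict.nodup_keys_empty
  have hnd0 : d0.keys.Nodup := by
    rw [hd0]
    exact PySem.Dict.nodup_keys_foldl_insert_key deps (fun t => pvLookup t "pred") (fun _ _ => ([] : List Int))
      PySem.Dict.empty PySem.Dict.nodup_keys_empty
  have hndB : dB.keys.Nodup := by
    rw [hdB]
    exact PySem.Dict.nodup_keys_foldl_modify_key sps (fun p => p.1) [] (fun _ p => (fun v => v ++ [p.2])) d0 hnd0
  -- values
  have hvA : ∀ k : Int, dA.getD k [] = (ps.filter (fun p => p.1 == k)).map (fun x => x.2) := by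
    intro k
    rw [hdA, PySem.Dict.getD_foldl_modify_append]
    simp [PySem.Dict.getD_empty]
  have hv0 : ∀ k : Int, d0.getD k [] = [] := by
    intro k
    rw [hd0]
    exact pv_getD_preseed deps PySem.Dict.empty (fun k' => by simp [PySem.Dict.getD_empty]) k
  have hvB : ∀ k : Int, dB.getD k [] = (sps.filter (fun p => p.1 == k)).map (fun x => x.2) := by
    intro k
    rw [hdB, PySem.Dict.getD_foldl_modify_append, hv0, List.nil_append]
  -- items
  rw [PySem.Dict.items_eq_map_keys dA hndA [], PySem.Dict.items_eq_map_keys dB hndB [], hKB,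
    List.map_map]
  apply List.map_congr_left
  intro k _
  simp only [Function.comp]
  rw [hvA, hvB, pv_group_sorted]
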